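-- pv_equiv track=rewrite | github.com/jenaswift4-byte/project-fusion | bridge/listeners/kde_connect.py | _parse_notifications
-- ===== SOURCE A (Python) =====
-- def _parse_notifications(raw: str) -> list:
--     """解析 kdeconnect-cli 通知输出"""
--     notifications = []
--     current = {}
--     for line in raw.split("\n"):
--         line = line.strip()
--         if not line:
--             if current:
--                 notifications.append(current)
--                 current = {}
--             continue
--
--         if "=" in line:
--             key, _, value = line.partition("=")
--             current[key.strip()] = value.strip()
--
--     if current:
--         notifications.append(current)
--
--     return notifications
-- ===== SOURCE B (Python) =====
-- def _block_record(block):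
--     """Build one record dict from a block of (already stripped) lines."""
--     return {key.strip(): value.strip()
--             for key, _, value in (ln.partition("=") for ln in block if "=" in ln)}
--
--
-- def _parse_notifications(raw: str) -> list:
--     """解析 kdeconnect-cli 通知输出 — segment into blank-separated blocks, then map each block to a dict."""
--     blocks, blk = [], []
--     for ln in raw.split("\n"):
--         s = ln.strip()
--         if s:
--             blk.append(s)
--         else:
--             blocks.append(blk)
--             blk = []
--     blocks.append(blk)
--     return [rec for rec in map(_block_record, blocks) if rec]
-- ===== Notes on version B (the rewrite author's own statement) =====
-- stated objective: alternative
-- what changed: Replaced A's single stateful loop threading a running dict (with flush-on-blank and a trailing flush) by a segment-then-map pipeline: first split the lines into blank-separated blocks, then turn each block into a dict via a comprehension and keep the non-empty records.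
import Mathlib
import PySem

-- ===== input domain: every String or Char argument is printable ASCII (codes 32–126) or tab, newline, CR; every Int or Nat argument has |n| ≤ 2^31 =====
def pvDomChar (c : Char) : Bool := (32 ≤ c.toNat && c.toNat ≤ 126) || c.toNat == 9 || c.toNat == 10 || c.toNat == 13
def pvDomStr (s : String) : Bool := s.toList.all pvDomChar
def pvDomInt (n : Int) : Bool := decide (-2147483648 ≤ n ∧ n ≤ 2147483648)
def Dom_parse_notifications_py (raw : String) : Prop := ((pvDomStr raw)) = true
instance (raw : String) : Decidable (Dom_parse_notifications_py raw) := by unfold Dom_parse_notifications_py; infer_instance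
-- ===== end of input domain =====

-- B replaces A's stateful accumulator loop with a split-into-blocks-then-map-to-dicts pipeline (same cost, different decomposition).

-- s.partition(sep): hand port (PySem has no partition); exact: splits at the FIRST occurrence of sep
-- (PySem.Str.find), returning (whole, "", "") when sep is absent, like CPython.
def pyPartition (s sep : String) : String × String × String :=
  let i := PySem.Str.find s sep
  if i < 0 then (s, "", "")
  else (String.ofList (s.toList.take i.toNat), sep,
        String.ofList (s.toList.drop (i.toNat + (PySem.Str.len sep).toNat)))

-- ===== PORT A =====
-- one step of A's loop: strip, flush-on-blank, insert on '=' lines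
def pvStepA (st : List (List (String × String)) × PySem.Dict String String) (line : String) :
    List (List (String × String)) × PySem.Dict String String :=
  let line := PySem.Str.strip line
  if line = "" then
    if st.2.items = [] then st else (st.1 ++ [st.2.items], PySem.Dict.empty)
  else if PySem.Str.isIn "=" line then
    let p := pyPartition line "="
    (st.1, st.2.insert (PySem.Str.strip p.1) (PySem.Str.strip p.2.2))
  else st

def parse_notifications_py (raw : String) : List (List (String × String)) :=
  -- raw.split("\n"): "\n" ≠ "" so split? is always some
  let lines := (PySem.Str.split? raw "\n").getD []
  let st := lines.foldl pvStepA ([], PySem.Dict.empty)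
  if st.2.items = [] then st.1 else st.1 ++ [st.2.items]

-- ===== PORT B =====
-- Source B's block-splitting loop step: stripped non-blank lines extend the current block, blank lines close it
def pvStepB (st : List (List String) × List String) (ln : String) :
    List (List String) × List String :=
  let s := PySem.Str.strip ln
  if s = "" then (st.1 ++ [st.2], []) else (st.1, st.2 ++ [s])

-- Source B's _block_record: dict comprehension over the '=' lines of a block
def pvBlockRecord (block : List String) : List (String × String) :=
  (block.foldl (fun d ln =>
      if PySem.Str.isIn "=" ln then
        let p := pyPartition ln "="
        d.insert (PySem.Str.strip p.1) (PySem.Str.strip p.2.2)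
      else d) PySem.Dict.empty).items

def parse_notifications_py_alt (raw : String) : List (List (String × String)) :=
  let lines := (PySem.Str.split? raw "\n").getD []
  let st := lines.foldl pvStepB ([], [])
  let blocks := st.1 ++ [st.2]
  ((blocks.map pvBlockRecord).filter (fun rec => rec ≠ []))

-- ===== PRECONDITION & SPEC =====
def Spec_parse_notifications_py (raw : String) (out : List (List (String × String))) : Prop := out = parse_notifications_py_alt raw
instance (raw : String) (out : List (List (String × String))) : Decidable (Spec_parse_notifications_py raw out) := by unfold Spec_parse_notifications_py; infer_instance

-- ===== CLAIM (what is proved, stated in full; the proofs are below) =====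
def Claim_equal_parse_notifications_py : Prop := ∀ (raw : String), Dom_parse_notifications_py raw → Spec_parse_notifications_py raw (parse_notifications_py raw)

-- ===== LEMMAS AND PROOFS =====

-- the records produced from a list of blocks
def pvRecs (bs : List (List String)) : List (List (String × String)) :=
  (bs.map pvBlockRecord).filter (fun rec => rec ≠ [])

lemma pvRecs_append_singleton (bs : List (List String)) (blk : List String) :
    pvRecs (bs ++ [blk]) =
      if pvBlockRecord blk = [] then pvRecs bs else pvRecs bs ++ [pvBlockRecord blk] := by
  simp [pvRecs, List.filter_append]
  split_ifs with h <;> simp [h]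

-- the underlying dict of a block
def pvBlockDict (block : List String) : PySem.Dict String String :=
  block.foldl (fun d ln =>
      if PySem.Str.isIn "=" ln then
        let p := pyPartition ln "="
        d.insert (PySem.Str.strip p.1) (PySem.Str.strip p.2.2)
      else d) PySem.Dict.empty

lemma pvBlockDict_items (block : List String) : (pvBlockDict block).items = pvBlockRecord block := rfl

lemma pvBlockDict_of_items_nil (block : List String) (h : pvBlockRecord block = []) :
    pvBlockDict block = PySem.Dict.empty := by
  have h2 : (pvBlockDict block).items = [] := h
  cases hd : pvBlockDict block with
  | mk l =>
    rw [hd] at h2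
    have hl : l = [] := h2
    subst hl
    rfl

-- main invariant: running A's loop from a state that "summarises" B's state (bs, blk)
-- lands in the state summarising B's final state
lemma pv_main (ls : List String) (bs : List (List String)) (blk : List String) :
    ls.foldl pvStepA (pvRecs bs, pvBlockDict blk)
      = (pvRecs (ls.foldl pvStepB (bs, blk)).1, pvBlockDict (ls.foldl pvStepB (bs, blk)).2) := by
  induction ls generalizing bs blk with
  | nil => rfl
  | cons l ls ih =>
    simp only [List.foldl_cons]
    have hstep : pvStepA (pvRecs bs, pvBlockDict blk) l
        = (pvRecs (pvStepB (bs, blk) l).1, pvBlockDict (pvStepB (bs, blk) l).2) := by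
      by_cases hb : PySem.Str.strip l = ""
      · have hBstep : pvStepB (bs, blk) l = (bs ++ [blk], []) := by simp [pvStepB, hb]
        rw [hBstep]
        by_cases hc : pvBlockRecord blk = []
        · have hA : pvStepA (pvRecs bs, pvBlockDict blk) l = (pvRecs bs, pvBlockDict blk) := by
            simp [pvStepA, hb, pvBlockDict_items, hc]
          rw [hA, pvRecs_append_singleton, if_pos hc, pvBlockDict_of_items_nil blk hc]
          rfl
        · have hA : pvStepA (pvRecs bs, pvBlockDict blk) l
              = (pvRecs bs ++ [(pvBlockDict blk).items], PySem.Dict.empty) := by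
            simp [pvStepA, hb, pvBlockDict_items, hc]
          rw [hA, pvRecs_append_singleton, if_neg hc, pvBlockDict_items]
          rfl
      · by_cases he : PySem.Chars.isIn ['='] (PySem.Chars.strip l.toList) = true
        · simp [pvStepA, pvStepB, hb, he, pvBlockDict, List.foldl_append]
        · simp [pvStepA, pvStepB, hb, he, pvBlockDict, List.foldl_append]
    rw [hstep, ih]

-- ===== VERDICT (by name: the statement is the Claim_ definition above) =====
theorem parse_notifications_py_spec : Claim_equal_parse_notifications_py := by
  intro raw _
  unfold Spec_parse_notifications_py parse_notifications_py parse_notifications_py_alt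
  have h := pv_main ((PySem.Str.split? raw "\n").getD []) [] []
  have h0 : pvRecs ([] : List (List String)) = [] := rfl
  have h1 : pvBlockDict ([] : List String) = PySem.Dict.empty := rfl
  rw [h0, h1] at h
  simp only [h, pvBlockDict_items]
  by_cases hc : pvBlockRecord ((((PySem.Str.split? raw "\n").getD []).foldl pvStepB ([], [])).2) = []
  · simp [hc, pvRecs]
  · simp [hc, pvRecs]
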